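-- pv_equiv track=rewrite | github.com/FanFicDev/hermes | util.py | urlTitle
-- ===== SOURCE A (Python) =====
-- def urlTitle(title: str) -> str:
-- 	ut = ''
-- 	for char in title:
-- 		if char.isalnum():
-- 			ut += char
-- 		elif len(ut) == 0 or ut[-1] != '-':
-- 			ut += '-'
-- 	return ut.rstrip('-')
-- ===== SOURCE B (Python) =====
-- def urlTitle(title: str) -> str:
--     mapped = ['-' if not c.isalnum() else c for c in title]
--     kept = mapped[:1] + [c for p, c in zip(mapped, mapped[1:]) if not (p == '-' and c == '-')]
--     return ''.join(kept).rstrip('-')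
-- ===== Notes on version B (the rewrite author's own statement) =====
-- stated objective: simpler
-- what changed: Replaced A's single stateful loop that consults the output accumulator's last character with three stateless passes: map each char to itself or a dash, drop a dash whose predecessor in the mapped list is also a dash via a zip-with-neighbour filter, then strip trailing dashes.
import Mathlib
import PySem

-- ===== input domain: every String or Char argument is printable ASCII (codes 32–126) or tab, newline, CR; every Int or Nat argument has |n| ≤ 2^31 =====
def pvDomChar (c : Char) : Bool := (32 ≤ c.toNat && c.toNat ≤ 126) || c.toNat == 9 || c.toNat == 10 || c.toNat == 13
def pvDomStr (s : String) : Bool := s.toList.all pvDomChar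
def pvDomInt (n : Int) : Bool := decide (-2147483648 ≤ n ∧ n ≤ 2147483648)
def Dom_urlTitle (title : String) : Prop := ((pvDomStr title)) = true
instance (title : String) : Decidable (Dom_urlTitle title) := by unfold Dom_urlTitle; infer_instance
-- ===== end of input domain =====

-- B replaces A's stateful collapsing loop by map + neighbour-pair filter + rstrip (objective: simpler).

-- exact hand port of Python's s.rstrip('-') (single strip character): drop trailing '-'s;
-- used by both ports because both Pythons end with .rstrip('-')
def pvRstripDash (cs : List Char) : List Char :=
  (cs.reverse.dropWhile (fun c => c == '-')).reverse

-- ===== PORT A =====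
def urlTitle (title : String) : String :=
  String.ofList (pvRstripDash (title.toList.foldl
    (fun ut c =>
      if PySem.Chars.isalnum c then ut ++ [c]
      else if ut.length == 0 || !(PySem.List.pyGet? ut (-1) == some '-') then ut ++ ['-']
      else ut) []))

-- ===== PORT B =====
def urlTitle_alt (title : String) : String :=
  let mapped := title.toList.map (fun c => if !(PySem.Chars.isalnum c) then '-' else c)
  let kept := mapped.take 1 ++
    ((mapped.zip mapped.tail).filter (fun pc => !(pc.1 == '-' && pc.2 == '-'))).map Prod.snd
  String.ofList (pvRstripDash kept)

-- ===== PRECONDITION & SPEC =====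
def Spec_urlTitle (title : String) (out : String) : Prop := out = urlTitle_alt title
instance (title : String) (out : String) : Decidable (Spec_urlTitle title out) := by unfold Spec_urlTitle; infer_instance

-- ===== CLAIM (what is proved, stated in full; the proofs are below) =====
def Claim_equal_urlTitle : Prop := ∀ (title : String), Dom_urlTitle title → Spec_urlTitle title (urlTitle title)

-- ===== LEMMAS AND PROOFS =====

-- canonical "collapse a dash after a dash" recursion, parameterised by the previous (mapped) char
def pvTd (prev : Char) : List Char → List Char
  | [] => []
  | d :: t => if d = '-' ∧ prev = '-' then pvTd d t else d :: pvTd d t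

def pvStep (ut : List Char) (c : Char) : List Char :=
  if PySem.Chars.isalnum c then ut ++ [c]
  else if ut.length == 0 || !(PySem.List.pyGet? ut (-1) == some '-') then ut ++ ['-']
  else ut

def pvMap (c : Char) : Char := if !(PySem.Chars.isalnum c) then '-' else c

lemma pvGet_last (xs : List Char) (x : Char) :
    PySem.List.pyGet? (xs ++ [x]) (-1) = some x := by
  simp [PySem.List.pyGet?, PySem.List.pyIdx?]

lemma pvAlnum_ne_dash {c : Char} (h : PySem.Chars.isalnum c = true) : c ≠ '-' := by
  rintro rfl; exact absurd h (by decide)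

-- A's loop from a nonempty accumulator whose last element is `prev` appends exactly pvTd prev (map)
lemma pvLoop_eq (l : List Char) : ∀ (prev : Char) (ut : List Char),
    PySem.List.pyGet? ut (-1) = some prev →
    l.foldl pvStep ut = ut ++ pvTd prev (l.map pvMap) := by
  induction l with
  | nil => intro prev ut _; simp [pvTd]
  | cons c t ih =>
    intro prev ut hlast
    have hne : ut ≠ [] := by rintro rfl; simp [PySem.List.pyGet?] at hlast
    have hlen : (ut.length == 0) = false := by
      simp [List.length_eq_zero_iff]; exact hne
    by_cases hc : PySem.Chars.isalnum c = true
    · have hm : pvMap c = c := by simp [pvMap, hc]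
      have hstep : pvStep ut c = ut ++ [c] := by simp [pvStep, hc]
      simp only [List.foldl_cons, hstep]
      rw [ih c (ut ++ [c]) (pvGet_last ut c)]
      simp [pvTd, hm, pvAlnum_ne_dash hc]
    · have hc' : PySem.Chars.isalnum c = false := by simpa using hc
      have hm : pvMap c = '-' := by simp [pvMap, hc']
      by_cases hp : prev = '-'
      · subst hp
        have hstep : pvStep ut c = ut := by simp [pvStep, hc', hlen, hlast]
        simp only [List.foldl_cons, hstep]
        rw [ih '-' ut hlast]
        simp [pvTd, hm]
      · have hstep : pvStep ut c = ut ++ ['-'] := by simp [pvStep, hc', hlen, hlast, hp]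
        simp only [List.foldl_cons, hstep]
        rw [ih '-' (ut ++ ['-']) (pvGet_last ut '-')]
        simp [pvTd, hm, hp]

-- B's zip-filter pass IS pvTd
lemma pvZip_eq (ds : List Char) : ∀ (p : Char),
    (((p :: ds).zip ds).filter (fun pc => !(pc.1 == '-' && pc.2 == '-'))).map Prod.snd
      = pvTd p ds := by
  induction ds with
  | nil => intro p; simp [pvTd]
  | cons d t ih =>
    intro p
    by_cases h : p = '-' ∧ d = '-'
    · obtain ⟨hp, hd⟩ := h; subst hp; subst hd
      rw [List.zip_cons_cons, List.filter_cons_of_neg (by decide), ih '-']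
      simp [pvTd]
    · have hb : (!(p == '-' && d == '-')) = true := by
        rcases not_and_or.mp h with h1 | h1 <;> simp [h1]
      rw [List.zip_cons_cons, List.filter_cons_of_pos (by exact hb), List.map_cons, ih d]
      have hnd : ¬(d = '-' ∧ p = '-') := fun ⟨a, b⟩ => h ⟨b, a⟩
      conv_rhs => rw [pvTd]
      rw [if_neg hnd]

-- ===== VERDICT (by name: the statement is the Claim_ definition above) =====
theorem urlTitle_spec : Claim_equal_urlTitle := by
  intro title _
  unfold Spec_urlTitle urlTitle urlTitle_alt
  cases h : title.toList with
  | nil => rfl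
  | cons c t =>
    simp only []
    congr 1
    congr 1
    have hfirst : pvStep [] c = [pvMap c] := by
      by_cases hc : PySem.Chars.isalnum c = true
      · simp [pvStep, pvMap, hc]
      · have hc' : PySem.Chars.isalnum c = false := by simpa using hc
        simp [pvStep, pvMap, hc']
    show (c :: t).foldl pvStep [] = _
    rw [List.foldl_cons, hfirst,
      pvLoop_eq t (pvMap c) [pvMap c] (by simpa using pvGet_last [] (pvMap c))]
    rw [show (fun c => if (!PySem.Chars.isalnum c) = true then '-' else c) = pvMap from rfl,
      List.map_cons, List.take_succ_cons, List.take_zero, List.tail_cons,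
      pvZip_eq (t.map pvMap) (pvMap c)]
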